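-- pv_equiv track=rewrite | github.com/takushi-m/atcoder-work | work/colopl2018_qual_c.py | check
-- ===== SOURCE A (Python) =====
-- def check(l):
--     if len(l)<2:
--         return True
--     for p in [2,3,5,7,11,13,17,19,23,29,31]:
--         cnt = 0
--         for x in l:
--             if x%p==0:
--                 cnt += 1
--             if cnt>1:
--                 return False
--     return True
-- ===== SOURCE B (Python) =====
-- # Product of the primes up to 31: a list element shares one of those primes with a
-- # previously seen element exactly when its gcd with the accumulated product exceeds 1.
-- M = 2 * 3 * 5 * 7 * 11 * 13 * 17 * 19 * 23 * 29 * 31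
--
--
-- def _gcd(a, b):
--     while b:
--         a, b = b, a % b
--     return a
--
--
-- def check(l):
--     acc = 1
--     for x in l:
--         s = _gcd(abs(x), M)          # product of the primes <= 31 dividing x
--         if _gcd(s, acc) != 1:        # shares a prime with an earlier element
--             return False
--         acc *= s
--     return True
-- ===== Notes on version B (the rewrite author's own statement) =====
-- stated objective: alternative
-- what changed: Replaces A's per-prime counting (11 repeated scans of l, one scalar counter each) with a gcd-based sweep: each element is reduced to its squarefree part gcd(|x|, 2*3*...*31) and a single running product of the primes seen so far is kept, failing when a new element's part is not coprime to that product.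
import Mathlib
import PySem

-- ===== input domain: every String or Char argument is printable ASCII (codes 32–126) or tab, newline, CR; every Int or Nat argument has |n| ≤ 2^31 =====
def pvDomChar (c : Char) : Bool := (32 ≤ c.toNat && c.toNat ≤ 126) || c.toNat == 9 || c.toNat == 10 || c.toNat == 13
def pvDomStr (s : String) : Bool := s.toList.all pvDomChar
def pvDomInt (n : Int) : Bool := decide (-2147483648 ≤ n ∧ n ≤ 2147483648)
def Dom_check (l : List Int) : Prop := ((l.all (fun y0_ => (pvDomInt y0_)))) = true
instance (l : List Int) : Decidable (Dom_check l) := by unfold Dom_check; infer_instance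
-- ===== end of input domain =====

-- B replaces A's per-prime counting scans with a gcd-based sweep: it folds each element
-- to its squarefree part gcd(|x|, 2*3*...*31) and keeps the product of primes seen so far,
-- failing when a new element's part is not coprime to that product (alternative algorithm).

-- ===== PORT A =====
-- inner 'for x in l' loop of A, carrying cnt; false = the 'return False' escape
def pvInnerA (p : Int) : List Int → Int → Bool
  | [], _ => true
  | x :: xs, cnt =>
    let cnt' := if PySem.Int.mod x p == 0 then cnt + 1 else cnt
    if cnt' > 1 then false else pvInnerA p xs cnt'

-- outer 'for p in [2,…,31]' loop of A
def pvOuterA : List Int → List Int → Bool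
  | [], _ => true
  | p :: ps, l => if pvInnerA p l 0 then pvOuterA ps l else false

def check (l : List Int) : Bool :=
  if l.length < 2 then true else pvOuterA [2,3,5,7,11,13,17,19,23,29,31] l

-- ===== PORT B =====
-- Source B's M = 2 * 3 * 5 * 7 * 11 * 13 * 17 * 19 * 23 * 29 * 31
def pvM : Nat := 2 * 3 * 5 * 7 * 11 * 13 * 17 * 19 * 23 * 29 * 31

-- Source B's hand-written Euclid `_gcd`; in B both arguments are always nonnegative,
-- so Nat subtraction-free `%` coincides exactly with Python's `%` here
def pvGcd (a b : Nat) : Nat :=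
  if h : b = 0 then a else pvGcd b (a % b)
termination_by b
decreasing_by exact Nat.mod_lt _ (Nat.pos_of_ne_zero h)

-- B's 'for x in l' loop carrying acc (abs(x) ported as Int.natAbs)
def pvLoopB : List Int → Nat → Bool
  | [], _ => true
  | x :: xs, acc =>
    let s := pvGcd x.natAbs pvM
    if pvGcd s acc ≠ 1 then false else pvLoopB xs (acc * s)

def check_alt (l : List Int) : Bool := pvLoopB l 1

-- ===== PRECONDITION & SPEC =====
def Spec_check (l : List Int) (out : Bool) : Prop := out = check_alt l
instance (l : List Int) (out : Bool) : Decidable (Spec_check l out) := by unfold Spec_check; infer_instance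

-- ===== CLAIM (what is proved, stated in full; the proofs are below) =====
def Claim_equal_check : Prop := ∀ (l : List Int), Dom_check l → Spec_check l (check l)

-- ===== LEMMAS AND PROOFS =====

def pvPrimesN : List Nat := [2,3,5,7,11,13,17,19,23,29,31]

/-- number of elements of `l` divisible by `p` -/
def pvCntN (p : Nat) (l : List Int) : Nat :=
  (l.filter (fun x => decide (p ∣ x.natAbs))).length

lemma pvGcd_eq : ∀ (b a : Nat), pvGcd a b = Nat.gcd a b := by
  intro b
  induction b using Nat.strong_induction_on with
  | _ b ih =>
    intro a
    rw [pvGcd]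
    by_cases h : b = 0
    · simp [h]
    · rw [dif_neg h, ih (a % b) (Nat.mod_lt _ (Nat.pos_of_ne_zero h)),
        Nat.gcd_comm b (a % b), ← Nat.gcd_rec, Nat.gcd_comm]

lemma pvGcd_eq' (a b : Nat) : pvGcd a b = Nat.gcd a b := pvGcd_eq b a

lemma pvPrimesN_prime : ∀ p ∈ pvPrimesN, Nat.Prime p := by decide

lemma pvPrimesN_dvd_pvM : ∀ p ∈ pvPrimesN, p ∣ pvM := by decide

lemma pvM_eq_prod : pvM = pvPrimesN.prod := by decide

lemma prime_dvd_pvM_mem {q : Nat} (hq : Nat.Prime q) (hdvd : q ∣ pvM) : q ∈ pvPrimesN := by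
  rw [pvM_eq_prod] at hdvd
  obtain ⟨a, ha, hqa⟩ := (hq.prime.dvd_prod_iff).mp hdvd
  have hap := pvPrimesN_prime a ha
  rwa [(Nat.prime_dvd_prime_iff_eq hq hap).mp hqa]

lemma dvd_s_iff {p : Nat} (hp : p ∈ pvPrimesN) (x : Int) :
    p ∣ Nat.gcd x.natAbs pvM ↔ p ∣ x.natAbs := by
  rw [Nat.dvd_gcd_iff]
  exact ⟨fun h => h.1, fun h => ⟨h, pvPrimesN_dvd_pvM p hp⟩⟩

lemma gcd_s_acc_ne_one {x : Int} {acc : Nat} (hacc : 0 < acc) :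
    Nat.gcd (Nat.gcd x.natAbs pvM) acc ≠ 1 ↔
      ∃ p ∈ pvPrimesN, p ∣ x.natAbs ∧ p ∣ acc := by
  constructor
  · intro h
    obtain ⟨q, hq, hqd⟩ := Nat.exists_prime_and_dvd h
    have hqs : q ∣ Nat.gcd x.natAbs pvM := hqd.trans (Nat.gcd_dvd_left _ _)
    have hqM : q ∣ pvM := hqs.trans (Nat.gcd_dvd_right _ _)
    have hmem := prime_dvd_pvM_mem hq hqM
    exact ⟨q, hmem, (dvd_s_iff hmem x).mp hqs, hqd.trans (Nat.gcd_dvd_right _ _)⟩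
  · rintro ⟨p, hp, hpx, hpa⟩ h1
    have hps : p ∣ Nat.gcd x.natAbs pvM := (dvd_s_iff hp x).mpr hpx
    have : p ∣ 1 := h1 ▸ Nat.dvd_gcd hps hpa
    exact Nat.Prime.one_lt (pvPrimesN_prime p hp) |>.ne' (Nat.dvd_one.mp this)

lemma pvCntN_cons (p : Nat) (x : Int) (xs : List Int) :
    pvCntN p (x :: xs) = (if p ∣ x.natAbs then 1 else 0) + pvCntN p xs := by
  by_cases h : p ∣ x.natAbs <;> simp [pvCntN, List.filter_cons, h] <;> omega

lemma pvLoopB_spec (l : List Int) : ∀ (acc : Nat), 0 < acc → acc ∣ pvM →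
    (pvLoopB l acc = true ↔
      ∀ p ∈ pvPrimesN, (p ∣ acc → pvCntN p l = 0) ∧ pvCntN p l ≤ 1) := by
  induction l with
  | nil =>
    intro acc _ _
    exact ⟨fun _ p _ => ⟨fun _ => rfl, Nat.zero_le 1⟩, fun _ => rfl⟩
  | cons x xs ih =>
    intro acc hpos hdvd
    have hs_pos : 0 < Nat.gcd x.natAbs pvM :=
      Nat.gcd_pos_of_pos_right _ (by decide)
    rw [show pvLoopB (x :: xs) acc =
        (if pvGcd (pvGcd x.natAbs pvM) acc ≠ 1 then false
         else pvLoopB xs (acc * pvGcd x.natAbs pvM)) from rfl]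
    simp only [pvGcd_eq']
    by_cases hg : Nat.gcd (Nat.gcd x.natAbs pvM) acc ≠ 1
    · rw [if_pos hg]
      obtain ⟨p, hp, hpx, hpa⟩ := (gcd_s_acc_ne_one hpos).mp hg
      constructor
      · intro hfalse; cases hfalse
      · intro hall
        have h := (hall p hp).1 hpa
        rw [pvCntN_cons, if_pos hpx] at h
        omega
    · rw [if_neg hg]
      rw [not_not] at hg
      have hno : ∀ p ∈ pvPrimesN, ¬(p ∣ x.natAbs ∧ p ∣ acc) := by
        intro p hp hcon
        exact ((gcd_s_acc_ne_one hpos).mpr ⟨p, hp, hcon.1, hcon.2⟩) hg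
      have hco : Nat.Coprime acc (Nat.gcd x.natAbs pvM) := by
        unfold Nat.Coprime; rw [Nat.gcd_comm]; exact hg
      have hdvd' : acc * Nat.gcd x.natAbs pvM ∣ pvM :=
        hco.mul_dvd_of_dvd_of_dvd hdvd (Nat.gcd_dvd_right _ _)
      rw [ih _ (Nat.mul_pos hpos hs_pos) hdvd']
      constructor
      · intro hall p hp
        have hpr := pvPrimesN_prime p hp
        have h := hall p hp
        rw [pvCntN_cons]
        by_cases hpx : p ∣ x.natAbs
        · have hpa : ¬ p ∣ acc := fun hpa => hno p hp ⟨hpx, hpa⟩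
          have hps : p ∣ acc * Nat.gcd x.natAbs pvM :=
            Dvd.dvd.mul_left ((dvd_s_iff hp x).mpr hpx) acc
          have h0 := h.1 hps
          simp only [if_pos hpx]
          exact ⟨fun hpa' => absurd hpa' hpa, by omega⟩
        · simp only [if_neg hpx, Nat.zero_add]
          refine ⟨fun hpa => h.1 (Dvd.dvd.mul_right hpa _), h.2⟩
      · intro hall p hp
        have hpr := pvPrimesN_prime p hp
        have h := hall p hp
        rw [pvCntN_cons] at h
        constructor
        · intro hps
          rcases (Nat.Prime.dvd_mul hpr).mp hps with hpa | hpsx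
          · have hpx : ¬ p ∣ x.natAbs := fun hpx => hno p hp ⟨hpx, hpa⟩
            have := h.1 hpa
            simpa [hpx] using this
          · have hpx : p ∣ x.natAbs := (dvd_s_iff hp x).mp hpsx
            have := h.2
            rw [if_pos hpx] at this
            omega
        · rcases h with ⟨_, h2⟩
          split_ifs at h2 <;> omega

lemma check_alt_iff (l : List Int) :
    check_alt l = true ↔ ∀ p ∈ pvPrimesN, pvCntN p l ≤ 1 := by
  unfold check_alt
  rw [pvLoopB_spec l 1 Nat.one_pos (Nat.one_dvd _)]
  constructor
  · intro h p hp; exact (h p hp).2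
  · intro h p hp
    refine ⟨fun h1 => ?_, h p hp⟩
    exact absurd (Nat.dvd_one.mp h1) (Nat.Prime.one_lt (pvPrimesN_prime p hp)).ne'

-- bridge: Python's `x % p == 0` for the primes is divisibility of |x|
lemma mod_zero_iff {p : Nat} (hp : 0 < p) (x : Int) :
    (PySem.Int.mod x (Int.ofNat p) == 0) = decide (p ∣ x.natAbs) := by
  have h1 : PySem.Int.mod x (Int.ofNat p) = 0 ↔ (Int.ofNat p) ∣ x :=
    by rw [PySem.Int.mod_eq_zero_iff_dvd]
  have h2 : (Int.ofNat p) ∣ x ↔ p ∣ x.natAbs := by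
    constructor
    · intro h; have := Int.natAbs_dvd_natAbs.mpr h; simpa using this
    · intro h
      have : ((Int.ofNat p)).natAbs ∣ x.natAbs := by simpa using h
      exact Int.natAbs_dvd_natAbs.mp this
  by_cases h : p ∣ x.natAbs
  · have h0 := h1.mpr (h2.mpr h)
    simp only [h, decide_true, beq_iff_eq]
    exact_mod_cast h0
  · simp only [h, decide_false, beq_eq_false_iff_ne, ne_eq]
    intro hc; exact h (h2.mp (h1.mp hc))

/-- count used by A's inner loop, over Int mod -/
def pvCnt (p : Int) (l : List Int) : Nat :=
  (l.filter (fun x => PySem.Int.mod x p == 0)).length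

lemma pvCnt_bridge {p : Nat} (hp : 0 < p) (l : List Int) :
    pvCnt (Int.ofNat p) l = pvCntN p l := by
  unfold pvCnt pvCntN
  congr 1
  apply List.filter_congr
  intro x _
  exact mod_zero_iff hp x

lemma pvInnerA_spec (p : Int) (l : List Int) : ∀ (cnt : Int), cnt ≤ 1 →
    (pvInnerA p l cnt = true ↔ cnt + (pvCnt p l : Int) ≤ 1) := by
  induction l with
  | nil =>
    intro cnt hcnt
    simpa [pvInnerA, pvCnt] using hcnt
  | cons x xs ih =>
    intro cnt hcnt
    simp only [pvInnerA]
    by_cases h : (PySem.Int.mod x p == 0) = true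
    · have hcc : pvCnt p (x :: xs) = pvCnt p xs + 1 := by
        simp [pvCnt, List.filter_cons, h]
      simp only [h, if_true]
      by_cases hgt : cnt + 1 > 1
      · rw [if_pos hgt]
        constructor
        · intro hf; cases hf
        · intro hle; exfalso; rw [hcc] at hle; push_cast at hle; omega
      · rw [if_neg hgt, ih (cnt + 1) (by omega), hcc]
        push_cast
        omega
    · have hcc : pvCnt p (x :: xs) = pvCnt p xs := by
        simp [pvCnt, List.filter_cons, h]
      simp only [h, Bool.false_eq_true, if_false]
      rw [if_neg (by omega : ¬ cnt > 1), ih cnt hcnt, hcc]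

lemma pvOuterA_spec (ps l : List Int) :
    pvOuterA ps l = true ↔ ∀ p ∈ ps, (pvCnt p l : Int) ≤ 1 := by
  induction ps with
  | nil => simp [pvOuterA]
  | cons p ps ih =>
    simp only [pvOuterA]
    by_cases h : pvInnerA p l 0 = true
    · rw [if_pos h, ih]
      have h0 : (pvCnt p l : Int) ≤ 1 := by
        have := (pvInnerA_spec p l 0 (by norm_num)).mp h
        omega
      constructor
      · intro hall q hq
        rcases List.mem_cons.mp hq with rfl | hq
        · exact h0
        · exact hall q hq
      · intro hall q hq
        exact hall q (List.mem_cons_of_mem _ hq)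
    · rw [if_neg h]
      have h0 : ¬ ((pvCnt p l : Int) ≤ 1) := fun hc =>
        h ((pvInnerA_spec p l 0 (by norm_num)).mpr (by omega))
      constructor
      · intro hf; exact absurd hf (by simp)
      · intro hall; exact absurd (hall p (by simp)) h0

lemma primes_int_map : ([2,3,5,7,11,13,17,19,23,29,31] : List Int) =
    pvPrimesN.map Int.ofNat := by decide

lemma check_iff (l : List Int) (h : ¬ l.length < 2) :
    check l = true ↔ ∀ p ∈ pvPrimesN, pvCntN p l ≤ 1 := by
  unfold check
  rw [if_neg h, pvOuterA_spec, primes_int_map, List.forall_mem_map]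
  constructor
  · intro hall p hp
    have := hall p hp
    rw [pvCnt_bridge (Nat.Prime.pos (pvPrimesN_prime p hp))] at this
    exact_mod_cast this
  · intro hall p hp
    rw [pvCnt_bridge (Nat.Prime.pos (pvPrimesN_prime p hp))]
    exact_mod_cast hall p hp

lemma pvCntN_le_len (p : Nat) (l : List Int) : pvCntN p l ≤ l.length :=
  List.length_filter_le _ _

-- ===== VERDICT (by name: the statement is the Claim_ definition above) =====
theorem check_spec : Claim_equal_check := by
  intro l _
  unfold Spec_check
  by_cases hlen : l.length < 2
  · have hB : check_alt l = true := by
      rw [check_alt_iff]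
      intro p _
      have := pvCntN_le_len p l
      omega
    unfold check
    rw [if_pos hlen, hB]
  · have hiff : check l = true ↔ check_alt l = true := by
      rw [check_iff l hlen, check_alt_iff]
    cases h1 : check l <;> cases h2 : check_alt l <;> simp_all
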